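-- pv_equiv track=rewrite | github.com/domdfcoding/pynist | pyms_nist_search/cas.py | check_cas_number
-- ===== SOURCE A (Python) =====
-- def check_cas_number(cas_no):
-- 	"""
-- 	Checks the CAS number to ensure the check digit is valid
-- 	with respect to the rest of the number.
--
-- 	If the CAS number is valid 0 is returned. If there is a problem the difference
-- 	between the computed check digit and that given as part of the CAS number
-- 	is returned.
-- 	"""
--
-- 	cas_no = int(cas_no)
--
-- 	check_digit = cas_no % 10
-- 	main_value = (cas_no - check_digit) // 10
-- 	block_2 = main_value % 100
-- 	block_1 = (main_value - block_2) // 100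
--
-- 	last_digit = block_2 % 10
--
-- 	check_total = last_digit + (((block_2 - last_digit) // 10) * 2)
--
-- 	for position, digit in enumerate(str(block_1)[::-1]):
-- 		check_total += int(digit) * (position + 3)
--
-- 	if check_digit == check_total % 10:
-- 		return 0
-- 	else:
-- 		return (check_total % 10) - check_digit
-- ===== SOURCE B (Python) =====
-- def check_cas_number(cas_no):
-- 	"""
-- 	Checks the CAS number to ensure the check digit is valid
-- 	with respect to the rest of the number.
--
-- 	If the CAS number is valid 0 is returned. If there is a problem the difference
-- 	between the computed check digit and that given as part of the CAS number
-- 	is returned.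
-- 	"""
-- 	cas_no = int(cas_no)
-- 	check_digit = cas_no % 10
-- 	n = cas_no // 10
-- 	check_total = 0
-- 	position = 1
-- 	while n > 0:
-- 		check_total += (n % 10) * position
-- 		n //= 10
-- 		position += 1
-- 	r = check_total % 10
-- 	return 0 if check_digit == r else r - check_digit
-- ===== Notes on version B (the rewrite author's own statement) =====
-- stated objective: simpler
-- what changed: Replaces A's arithmetic block extraction (block_1/block_2) plus a string-conversion loop over str(block_1)[::-1] with one uniform divmod loop over the digits, never converting to a string.
import Mathlib
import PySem

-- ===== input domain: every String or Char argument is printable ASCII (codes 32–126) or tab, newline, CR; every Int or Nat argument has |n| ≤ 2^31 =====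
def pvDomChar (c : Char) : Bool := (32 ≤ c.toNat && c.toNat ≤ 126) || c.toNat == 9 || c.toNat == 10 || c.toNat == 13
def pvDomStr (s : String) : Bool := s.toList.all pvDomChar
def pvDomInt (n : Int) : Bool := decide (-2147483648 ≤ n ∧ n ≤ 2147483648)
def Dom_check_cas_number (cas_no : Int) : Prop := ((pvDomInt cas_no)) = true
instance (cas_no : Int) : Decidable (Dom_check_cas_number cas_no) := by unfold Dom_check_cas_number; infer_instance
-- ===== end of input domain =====

-- B replaces A's block extraction + string loop over str(block_1)[::-1] by one uniform arithmetic divmod loop over the digits (simpler; same cost).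


-- ===== PORT A =====
def check_cas_number (cas_no : Int) : Int :=
  let check_digit := PySem.Int.mod cas_no 10
  let main_value := PySem.Int.floordiv (cas_no - check_digit) 10
  let block_2 := PySem.Int.mod main_value 100
  let block_1 := PySem.Int.floordiv (main_value - block_2) 100
  let last_digit := PySem.Int.mod block_2 10
  let init := last_digit + (PySem.Int.floordiv (block_2 - last_digit) 10) * 2
  -- str(block_1)[::-1] (Str.slice? with step -1); int(digit) = ofChars? on the one-char string,
  -- `.getD 0` is only reached where int() raises (the '-' of a negative block_1), excluded by Pre_.
  let rev := (PySem.Str.slice? (PySem.Int.toStr block_1) none none (-1)).getD ""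
  let check_total := (PySem.List.enumerate rev.toList 0).foldl
      (fun acc pd => acc + ((PySem.Int.ofChars? [pd.2]).getD 0) * (pd.1 + 3)) init
  if check_digit = PySem.Int.mod check_total 10 then 0
  else PySem.Int.mod check_total 10 - check_digit

-- ===== PORT B =====
-- the `while n > 0:` loop of Source B
def casAltLoop (n position total : Int) : Int :=
  if h : 0 < n then
    casAltLoop (PySem.Int.floordiv n 10) (position + 1) (total + PySem.Int.mod n 10 * position)
  else total
termination_by n.toNat
decreasing_by
  have : PySem.Int.floordiv n 10 = n / 10 := by simp [pysem]
  omega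

def check_cas_number_alt (cas_no : Int) : Int :=
  let check_digit := PySem.Int.mod cas_no 10
  let n := PySem.Int.floordiv cas_no 10
  let check_total := casAltLoop n 1 0
  let r := PySem.Int.mod check_total 10
  if check_digit = r then 0 else r - check_digit

-- ===== PRECONDITION & SPEC =====
-- Pre_ excludes exactly the negative inputs: on cas_no < 0 the Python A raises ValueError
-- (int() meets the '-' sign while looping over str(block_1)[::-1]).
def Pre_check_cas_number (cas_no : Int) : Prop := 0 ≤ cas_no
instance (cas_no : Int) : Decidable (Pre_check_cas_number cas_no) := by
  unfold Pre_check_cas_number; infer_instance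

def pvWitness_check_cas_number : Int := (7732185)

def Spec_check_cas_number (cas_no : Int) (out : Int) : Prop := out = check_cas_number_alt cas_no
instance (cas_no : Int) (out : Int) : Decidable (Spec_check_cas_number cas_no out) := by
  unfold Spec_check_cas_number; infer_instance

-- ===== CLAIM (what is proved, stated in full; the proofs are below) =====
def Claim_equal_check_cas_number : Prop := ∀ (cas_no : Int), Dom_check_cas_number cas_no → Pre_check_cas_number cas_no → Spec_check_cas_number cas_no (check_cas_number cas_no)

-- ===== LEMMAS AND PROOFS =====

-- weighted digit sum of n, least-significant digit carrying weight w
def wsum : Nat → Int → Int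
  | n, w => if h : n = 0 then 0 else ((n % 10 : Nat) : Int) * w + wsum (n / 10) (w + 1)
decreasing_by omega

lemma wsum_unfold (n : Nat) (w : Int) :
    wsum n w = ((n % 10 : Nat) : Int) * w + wsum (n / 10) (w + 1) := by
  rw [wsum]
  split
  · subst ‹n = 0›; rw [wsum]; simp
  · rfl

lemma wsum_zero (w : Int) : wsum 0 w = 0 := by rw [wsum]; simp

lemma casAltLoop_eq (n : Nat) : ∀ (p t : Int), casAltLoop (n : Int) p t = t + wsum n p := by
  induction n using Nat.strong_induction_on with
  | _ n ih =>
    intro p t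
    rw [casAltLoop]
    by_cases h : n = 0
    · subst h; simp [wsum_zero]
    · have h0 : (0 : Int) < (n : Int) := by exact_mod_cast Nat.pos_of_ne_zero h
      rw [dif_pos h0]
      have hd : PySem.Int.floordiv (n : Int) 10 = ((n / 10 : Nat) : Int) := by
        simp [pysem]
      have hm : PySem.Int.mod (n : Int) 10 = ((n % 10 : Nat) : Int) := by
        simp [pysem]
      rw [hd, hm, ih (n / 10) (by omega)]
      rw [wsum_unfold n p]; ring

lemma ofChars_digitChar (d : Nat) (hd : d < 10) :
    (PySem.Int.ofChars? [Nat.digitChar d]).getD 0 = (d : Int) := by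
  interval_cases d <;> decide

-- toDigits characterisation ------------------------------------------------

lemma toDigitsCore_succ (f n : Nat) (l : List Char) :
    Nat.toDigitsCore 10 (f + 1) n l =
      if n / 10 = 0 then Nat.digitChar (n % 10) :: l
      else Nat.toDigitsCore 10 f (n / 10) (Nat.digitChar (n % 10) :: l) := by
  simp [Nat.toDigitsCore]

lemma toDigitsCore_acc (f : Nat) : ∀ (n : Nat) (l : List Char),
    Nat.toDigitsCore 10 f n l = Nat.toDigitsCore 10 f n [] ++ l := by
  induction f with
  | zero => intro n l; simp [Nat.toDigitsCore]
  | succ f ih =>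
    intro n l
    rw [toDigitsCore_succ, toDigitsCore_succ f n []]
    by_cases h : n / 10 = 0
    · simp [h]
    · rw [if_neg h, if_neg h, ih (n / 10) (Nat.digitChar (n % 10) :: l),
        ih (n / 10) [Nat.digitChar (n % 10)]]
      simp

lemma toDigitsCore_fuel : ∀ (f f' n : Nat), n < f → n < f' →
    Nat.toDigitsCore 10 f n [] = Nat.toDigitsCore 10 f' n [] := by
  intro f
  induction f with
  | zero => intro f' n h; omega
  | succ f ih =>
    intro f' n hf hf'
    cases f' with
    | zero => omega
    | succ f' =>
      rw [toDigitsCore_succ, toDigitsCore_succ]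
      by_cases h : n / 10 = 0
      · simp [h]
      · rw [if_neg h, if_neg h, toDigitsCore_acc, toDigitsCore_acc f',
          ih f' (n / 10) (by omega) (by omega)]

lemma toDigits10_split (n : Nat) (h : 10 ≤ n) :
    Nat.toDigits 10 n = Nat.toDigits 10 (n / 10) ++ [Nat.digitChar (n % 10)] := by
  unfold Nat.toDigits
  rw [toDigitsCore_succ]
  have h0 : ¬ n / 10 = 0 := by omega
  rw [if_neg h0, toDigitsCore_acc]
  congr 1
  exact toDigitsCore_fuel n (n / 10 + 1) (n / 10) (by omega) (by omega)

lemma toDigits10_small (n : Nat) (h : n < 10) :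
    Nat.toDigits 10 n = [Nat.digitChar n] := by
  unfold Nat.toDigits
  rw [toDigitsCore_succ]
  have h0 : n / 10 = 0 := by omega
  rw [if_pos h0, Nat.mod_eq_of_lt h]

-- A's loop over enumerate(str(b1)[::-1]) computes wsum with weights starting at s+3
lemma mapsum_eq (m : Nat) : ∀ (s : Int),
    (List.map (fun pd => ((PySem.Int.ofChars? [pd.2]).getD 0) * (pd.1 + 3))
      (PySem.List.enumerate ((Nat.toDigits 10 m).reverse) s)).sum = wsum m (s + 3) := by
  induction m using Nat.strong_induction_on with
  | _ m ih =>
    intro s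
    by_cases h : m < 10
    · rw [toDigits10_small m h]
      simp [PySem.List.enumerate_cons, PySem.List.enumerate_nil, ofChars_digitChar m h]
      rw [wsum_unfold m (s + 3), show m / 10 = 0 from by omega, wsum_zero,
        show m % 10 = m from by omega]
      ring
    · rw [toDigits10_split m (by omega)]
      simp only [List.reverse_append, List.reverse_cons, List.reverse_nil,
        List.nil_append, List.singleton_append]
      rw [PySem.List.enumerate_cons]
      simp only [List.map_cons, List.sum_cons]
      rw [ih (m / 10) (by omega) (s + 1), ofChars_digitChar (m % 10) (by omega),
        wsum_unfold m (s + 3)]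
      ring

lemma toChars_nonneg (b1 : Int) (h : 0 ≤ b1) :
    PySem.Int.toChars b1 = Nat.toDigits 10 b1.toNat := by
  unfold PySem.Int.toChars
  rw [if_neg (by omega)]

-- glue: wsum m 1 = m%10*1 + (m/10%10)*2 + wsum (m/100) 3
lemma wsum_split (m : Nat) :
    wsum m 1 = ((m % 10 : Nat) : Int) * 1 + ((m / 10 % 10 : Nat) : Int) * 2
      + wsum (m / 100) 3 := by
  rw [wsum_unfold m 1, show (1 : Int) + 1 = 2 from by norm_num,
    wsum_unfold (m / 10) 2, show (2 : Int) + 1 = 3 from by norm_num,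
    show m / 10 / 10 = m / 100 from by omega]
  ring

-- ===== VERDICT (by name: the statement is the Claim_ definition above) =====
theorem check_cas_number_spec : Claim_equal_check_cas_number := by
  intro cas _hdom hpre
  have h0 : (0 : Int) ≤ cas := hpre
  unfold Spec_check_cas_number check_cas_number check_cas_number_alt
  have Hm10 : ∀ a : Int, PySem.Int.mod a 10 = a % 10 := by intro a; simp [pysem]
  have Hm100 : ∀ a : Int, PySem.Int.mod a 100 = a % 100 := by intro a; simp [pysem]
  have Hd10 : ∀ a : Int, PySem.Int.floordiv a 10 = a / 10 := by intro a; simp [pysem]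
  have Hd100 : ∀ a : Int, PySem.Int.floordiv a 100 = a / 100 := by intro a; simp [pysem]
  simp only [pysem, Hm10, Hm100, Hd10, Hd100]
  rw [show (cas - cas % 10) / 10 = cas / 10 from by omega]
  rw [show cas / 10 % 100 % 10 = cas / 10 % 10 from by omega]
  rw [show (cas / 10 % 100 - cas / 10 % 10) / 10 = cas / 10 / 10 % 10 from by omega]
  rw [show (cas / 10 - cas / 10 % 100) / 100 = cas / 10 / 100 from by omega]
  rw [toChars_nonneg (cas / 10 / 100) (by omega)]
  simp only [Option.getD_some, String.toList_ofList]
  rw [mapsum_eq, show (0 : Int) + 3 = 3 from by norm_num]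
  have hB : casAltLoop (cas / 10) 1 0 = 0 + wsum (cas / 10).toNat 1 := by
    rw [show cas / 10 = (((cas / 10).toNat : Nat) : Int) from by omega, casAltLoop_eq]
    rw [Int.toNat_natCast]
  rw [hB]
  have c1 : (((cas / 10).toNat % 10 : Nat) : Int) = cas / 10 % 10 := by omega
  have c2 : (((cas / 10).toNat / 10 % 10 : Nat) : Int) = cas / 10 / 10 % 10 := by omega
  have c3 : (cas / 10).toNat / 100 = (cas / 10 / 100).toNat := by omega
  have key : cas / 10 % 10 + cas / 10 / 10 % 10 * 2 + wsum (cas / 10 / 100).toNat 3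
      = 0 + wsum (cas / 10).toNat 1 := by
    rw [wsum_split (cas / 10).toNat, c1, c2, c3]; ring
  rw [key]
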